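-- pv_equiv track=rewrite | github.com/Sultanbp18/cashmate | src/services/nlp_processor.py | _detect_account_from_word
-- ===== SOURCE A (Python) =====
-- def _detect_account_from_word(word: str) -> str:
--     """Detect account type from a single word."""
--     word_lower = word.lower()
--
--     # Skip transfer-related keywords that shouldn't be treated as accounts
--     transfer_keywords = [
--         'transfer', 'pindah', 'tarik', 'ambil', 'kirim', 'dari', 'ke',
--         'topup', 'top', 'up', 'isi', 'saldo', 'tunai'
--     ]
--     if word_lower in transfer_keywords:
--         return 'cash'  # Default fallback
--
--     # Specific bank detection - expanded list
--     specific_banks = [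
--         'bca', 'bri', 'bni', 'mandiri', 'btn', 'cimb', 'danamon', 'mega',
--         'permata', 'panin', 'bukopin', 'maybank', 'btn', 'bjb', 'bsi',
--         'btpn', 'jenius', 'neo', 'seabank', 'uob', 'ocbc', 'dbs', 'hsbc'
--     ]
--     if word_lower in specific_banks:
--         return word_lower
--
--     # Other account types
--     account_mapping = {
--         'cash': ['cash', 'tunai', 'uang'],
--         'dana': ['dana'],
--         'gopay': ['gopay', 'gojek'],
--         'ovo': ['ovo'],
--         'shopee': ['shopee', 'shopeepay'],
--         'bank': ['bank', 'rekening']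
--     }
--
--     for account, keywords in account_mapping.items():
--         if word_lower in keywords:
--             return account
--
--     # If it's a 3-letter word that looks like a bank code, treat it as a bank
--     if len(word_lower) == 3 and word_lower.isalpha():
--         return word_lower
--
--     # Default to the word itself (might be a custom account name)
--     return word_lower
-- ===== SOURCE B (Python) =====
-- # One flat keyword->account literal table; the function is a single dict lookup
-- # with the word itself as default ('tunai' yields 'cash' on both of A's paths,
-- # and A's 3-letter bank-code branch returns word_lower anyway, so the default covers it).
--
-- _LOOKUP = {
--     'transfer': 'cash', 'pindah': 'cash', 'tarik': 'cash', 'ambil': 'cash',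
--     'kirim': 'cash', 'dari': 'cash', 'ke': 'cash', 'topup': 'cash', 'top': 'cash',
--     'up': 'cash', 'isi': 'cash', 'saldo': 'cash', 'tunai': 'cash',
--     'bca': 'bca', 'bri': 'bri', 'bni': 'bni', 'mandiri': 'mandiri', 'btn': 'btn',
--     'cimb': 'cimb', 'danamon': 'danamon', 'mega': 'mega', 'permata': 'permata',
--     'panin': 'panin', 'bukopin': 'bukopin', 'maybank': 'maybank', 'bjb': 'bjb',
--     'bsi': 'bsi', 'btpn': 'btpn', 'jenius': 'jenius', 'neo': 'neo',
--     'seabank': 'seabank', 'uob': 'uob', 'ocbc': 'ocbc', 'dbs': 'dbs', 'hsbc': 'hsbc',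
--     'cash': 'cash', 'uang': 'cash',
--     'dana': 'dana',
--     'gopay': 'gopay', 'gojek': 'gopay',
--     'ovo': 'ovo',
--     'shopee': 'shopee', 'shopeepay': 'shopee',
--     'bank': 'bank', 'rekening': 'bank',
-- }
--
--
-- def _detect_account_from_word(word: str) -> str:
--     """Detect account type from a single word."""
--     word_lower = word.lower()
--     # unknown words (including 3-letter alphabetic codes) map to themselves
--     return _LOOKUP.get(word_lower, word_lower)
-- ===== Notes on version B (the rewrite author's own statement) =====
-- stated objective: simpler
-- what changed: Replaced the sequence of list-membership scans, the account_mapping loop and the two fallback branches by one flat literal keyword-to-account dict, so the function body is a single word.lower() plus LOOKUP.get(word_lower, word_lower) (the 3-letter bank-code branch of A returns word_lower anyway, so the default covers it).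
import Mathlib
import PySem

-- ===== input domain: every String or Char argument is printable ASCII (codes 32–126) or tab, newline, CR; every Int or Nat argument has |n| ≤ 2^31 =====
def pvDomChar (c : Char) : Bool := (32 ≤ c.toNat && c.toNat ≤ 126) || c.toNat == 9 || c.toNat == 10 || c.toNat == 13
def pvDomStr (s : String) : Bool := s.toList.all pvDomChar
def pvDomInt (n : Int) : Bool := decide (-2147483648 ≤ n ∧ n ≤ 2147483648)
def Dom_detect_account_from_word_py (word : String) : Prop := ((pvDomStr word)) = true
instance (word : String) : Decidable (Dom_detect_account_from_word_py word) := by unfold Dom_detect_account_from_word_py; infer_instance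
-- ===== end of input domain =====

-- B replaces A's sequence of membership scans, its mapping loop and the fallback branches
-- by one flat literal keyword→account dict, so the function is a single lookup with the
-- word itself as default (simpler).

-- ===== PORT A =====
def pvTransferKeywords : List String :=
  ["transfer", "pindah", "tarik", "ambil", "kirim", "dari", "ke",
   "topup", "top", "up", "isi", "saldo", "tunai"]

def pvSpecificBanks : List String :=
  ["bca", "bri", "bni", "mandiri", "btn", "cimb", "danamon", "mega",
   "permata", "panin", "bukopin", "maybank", "btn", "bjb", "bsi",
   "btpn", "jenius", "neo", "seabank", "uob", "ocbc", "dbs", "hsbc"]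

def pvAccountMapping : List (String × List String) :=
  [("cash", ["cash", "tunai", "uang"]),
   ("dana", ["dana"]),
   ("gopay", ["gopay", "gojek"]),
   ("ovo", ["ovo"]),
   ("shopee", ["shopee", "shopeepay"]),
   ("bank", ["bank", "rekening"])]

-- the 'for account, keywords in account_mapping.items()' loop with its early return
def pvMapLoop (wl : String) : List (String × List String) → Option String
  | [] => none
  | (account, keywords) :: rest =>
      if wl ∈ keywords then some account else pvMapLoop wl rest

def detect_account_from_word_py (word : String) : String :=
  let word_lower := PySem.Str.lower word
  if word_lower ∈ pvTransferKeywords then "cash"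
  else if word_lower ∈ pvSpecificBanks then word_lower
  else match pvMapLoop word_lower pvAccountMapping with
    | some account => account
    | none =>
        if PySem.Str.len word_lower = 3 ∧ PySem.Str.strIsalpha word_lower = true then
          word_lower
        else
          word_lower

-- ===== PORT B =====
-- the module-level literal dict of Source B
def pvFlatTable : PySem.Dict String String := PySem.Dict.mk
  [("transfer", "cash"), ("pindah", "cash"), ("tarik", "cash"), ("ambil", "cash"),
   ("kirim", "cash"), ("dari", "cash"), ("ke", "cash"), ("topup", "cash"), ("top", "cash"),
   ("up", "cash"), ("isi", "cash"), ("saldo", "cash"), ("tunai", "cash"), ("bca", "bca"),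
   ("bri", "bri"), ("bni", "bni"), ("mandiri", "mandiri"), ("btn", "btn"), ("cimb", "cimb"),
   ("danamon", "danamon"), ("mega", "mega"), ("permata", "permata"), ("panin", "panin"),
   ("bukopin", "bukopin"), ("maybank", "maybank"), ("bjb", "bjb"), ("bsi", "bsi"),
   ("btpn", "btpn"), ("jenius", "jenius"), ("neo", "neo"), ("seabank", "seabank"),
   ("uob", "uob"), ("ocbc", "ocbc"), ("dbs", "dbs"), ("hsbc", "hsbc"), ("cash", "cash"),
   ("uang", "cash"), ("dana", "dana"), ("gopay", "gopay"), ("gojek", "gopay"),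
   ("ovo", "ovo"), ("shopee", "shopee"), ("shopeepay", "shopee"), ("bank", "bank"),
   ("rekening", "bank")]

def detect_account_from_word_py_alt (word : String) : String :=
  let word_lower := PySem.Str.lower word
  (pvFlatTable.get? word_lower).getD word_lower

-- ===== PRECONDITION & SPEC =====
def Spec_detect_account_from_word_py (word : String) (out : String) : Prop := out = detect_account_from_word_py_alt word
instance (word : String) (out : String) : Decidable (Spec_detect_account_from_word_py word out) := by unfold Spec_detect_account_from_word_py; infer_instance

-- ===== CLAIM =====
def Claim_equal_detect_account_from_word_py : Prop := ∀ (word : String), Dom_detect_account_from_word_py word → Spec_detect_account_from_word_py word (detect_account_from_word_py word)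

-- ===== LEMMAS AND PROOFS =====

-- the heart of the proof: A's scan chain equals the flat-table lookup, for any
-- (already lowered) string, by cases on which of the 45 keywords it equals
set_option maxHeartbeats 2000000 in
theorem pvCore_eq (wl : String) :
    (if wl ∈ pvTransferKeywords then "cash"
     else if wl ∈ pvSpecificBanks then wl
     else match pvMapLoop wl pvAccountMapping with
       | some account => account
       | none =>
           if PySem.Str.len wl = 3 ∧ PySem.Str.strIsalpha wl = true then wl else wl)
    = ((pvFlatTable.get? wl).getD wl) := by
  by_cases h0 : wl = "transfer"
  · subst h0; rfl
  by_cases h1 : wl = "pindah"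
  · subst h1; rfl
  by_cases h2 : wl = "tarik"
  · subst h2; rfl
  by_cases h3 : wl = "ambil"
  · subst h3; rfl
  by_cases h4 : wl = "kirim"
  · subst h4; rfl
  by_cases h5 : wl = "dari"
  · subst h5; rfl
  by_cases h6 : wl = "ke"
  · subst h6; rfl
  by_cases h7 : wl = "topup"
  · subst h7; rfl
  by_cases h8 : wl = "top"
  · subst h8; rfl
  by_cases h9 : wl = "up"
  · subst h9; rfl
  by_cases h10 : wl = "isi"
  · subst h10; rfl
  by_cases h11 : wl = "saldo"
  · subst h11; rfl
  by_cases h12 : wl = "tunai"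
  · subst h12; rfl
  by_cases h13 : wl = "bca"
  · subst h13; rfl
  by_cases h14 : wl = "bri"
  · subst h14; rfl
  by_cases h15 : wl = "bni"
  · subst h15; rfl
  by_cases h16 : wl = "mandiri"
  · subst h16; rfl
  by_cases h17 : wl = "btn"
  · subst h17; rfl
  by_cases h18 : wl = "cimb"
  · subst h18; rfl
  by_cases h19 : wl = "danamon"
  · subst h19; rfl
  by_cases h20 : wl = "mega"
  · subst h20; rfl
  by_cases h21 : wl = "permata"
  · subst h21; rfl
  by_cases h22 : wl = "panin"
  · subst h22; rfl
  by_cases h23 : wl = "bukopin"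
  · subst h23; rfl
  by_cases h24 : wl = "maybank"
  · subst h24; rfl
  by_cases h25 : wl = "bjb"
  · subst h25; rfl
  by_cases h26 : wl = "bsi"
  · subst h26; rfl
  by_cases h27 : wl = "btpn"
  · subst h27; rfl
  by_cases h28 : wl = "jenius"
  · subst h28; rfl
  by_cases h29 : wl = "neo"
  · subst h29; rfl
  by_cases h30 : wl = "seabank"
  · subst h30; rfl
  by_cases h31 : wl = "uob"
  · subst h31; rfl
  by_cases h32 : wl = "ocbc"
  · subst h32; rfl
  by_cases h33 : wl = "dbs"
  · subst h33; rfl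
  by_cases h34 : wl = "hsbc"
  · subst h34; rfl
  by_cases h35 : wl = "cash"
  · subst h35; rfl
  by_cases h36 : wl = "uang"
  · subst h36; rfl
  by_cases h37 : wl = "dana"
  · subst h37; rfl
  by_cases h38 : wl = "gopay"
  · subst h38; rfl
  by_cases h39 : wl = "gojek"
  · subst h39; rfl
  by_cases h40 : wl = "ovo"
  · subst h40; rfl
  by_cases h41 : wl = "shopee"
  · subst h41; rfl
  by_cases h42 : wl = "shopeepay"
  · subst h42; rfl
  by_cases h43 : wl = "bank"
  · subst h43; rfl
  by_cases h44 : wl = "rekening"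
  · subst h44; rfl
  simp [pvTransferKeywords, pvSpecificBanks, pvAccountMapping, pvMapLoop, pvFlatTable,
    PySem.Dict.get?, PySem.Dict.mk, beq_iff_eq,
    h0, Ne.symm h0, h1, Ne.symm h1, h2, Ne.symm h2, h3, Ne.symm h3, h4, Ne.symm h4, h5, Ne.symm h5, h6, Ne.symm h6, h7, Ne.symm h7, h8, Ne.symm h8, h9, Ne.symm h9, h10, Ne.symm h10, h11, Ne.symm h11, h12, Ne.symm h12, h13, Ne.symm h13, h14, Ne.symm h14, h15, Ne.symm h15, h16, Ne.symm h16, h17, Ne.symm h17, h18, Ne.symm h18, h19, Ne.symm h19, h20, Ne.symm h20, h21, Ne.symm h21, h22, Ne.symm h22, h23, Ne.symm h23, h24, Ne.symm h24, h25, Ne.symm h25, h26, Ne.symm h26, h27, Ne.symm h27, h28, Ne.symm h28, h29, Ne.symm h29, h30, Ne.symm h30, h31, Ne.symm h31, h32, Ne.symm h32, h33, Ne.symm h33, h34, Ne.symm h34, h35, Ne.symm h35, h36, Ne.symm h36, h37, Ne.symm h37, h38, Ne.symm h38, h39, Ne.symm h39, h40, Ne.symm h40, h41, Ne.symm h41,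 h42, Ne.symm h42, h43, Ne.symm h43, h44, Ne.symm h44]

-- ===== VERDICT =====
theorem detect_account_from_word_py_spec : Claim_equal_detect_account_from_word_py := by
  intro word _
  show detect_account_from_word_py word = detect_account_from_word_py_alt word
  simp only [detect_account_from_word_py, detect_account_from_word_py_alt]
  exact pvCore_eq (PySem.Str.lower word)
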